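-- pv_equiv track=rewrite | github.com/kjnh10/pcw | work/atcoder/abc/abc017/D/answers/797899_kenseiQ.py | d_supplement
-- ===== SOURCE A (Python) =====
-- def d_supplement(N, M, F):
--     """
--     N:サプリメントの数
--     M:サプリメントの味の種類
--     F:要素iの値はi番目のサプリメントの味(1-origin)
--     """
--     MOD = 10**9 + 7
--
--     """
--     dp[i] = dp[i-1] + dp[i-2] + ... + dp[k]
--     kは F[j+1], F[j+2], ..., F[i] をすべて1日で摂取できるようなjのうち最小のもの。
--     """
--     dp = [0] * (N + 1)
--     dp[0] = 1  # 最初は"何も食べていない"1通り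
--
--     num = [0] * (M + 1)  # 尺取の区間内での、サプリの味ごとの個数
--     left = 0  # 上のdpのコメントにおけるkの役割
--     sum = dp[0]
--
--     for i in range(N):
--         num[F[i]] += 1
--         # 区間内に含まれる同じ味のサプリメント個数が1つになるまでdpの左端を縮める
--         while num[F[i]] > 1:
--             num[F[left]] -= 1
--             sum -= dp[left]
--             if sum < 0:
--                 sum += MOD
--             sum %= MOD
--             left += 1
--         dp[i + 1] = sum
--         sum += dp[i + 1]
--         sum %= MOD
--     return dp[-1]
-- ===== SOURCE B (Python) =====
-- def d_supplement(N, M, F):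
--     """Two staged passes instead of a counting-array two-pointer loop: pass 1
--     computes, via a last-occurrence dictionary, the earliest valid window start
--     low[i] for each i (low = running max of last-occurrence+1; no count array,
--     no shrink loop); pass 2 fills dp with a prefix-sum array, reading each dp
--     value off as a difference of two prefix sums."""
--     MOD = 10**9 + 7
--     last = {}
--     low = [0] * N
--     lo = 0
--     for i in range(N):
--         t = F[i]
--         if t in last and last[t] + 1 > lo:
--             lo = last[t] + 1
--         low[i] = lo
--         last[t] = i
--     dp = [0] * (N + 1)
--     dp[0] = 1
--     P = [0] * (N + 2)
--     P[1] = 1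
--     for i in range(N):
--         dp[i + 1] = (P[i + 1] - P[low[i]]) % MOD
--         P[i + 2] = (P[i + 1] + dp[i + 1]) % MOD
--     return dp[N]
-- ===== Notes on version B (the rewrite author's own statement) =====
-- stated objective: alternative
-- what changed: B removes A's counting array and shrink while-loop entirely: a first pass with a last-occurrence dictionary computes each window start as a running max of last-occurrence+1, and a second pass fills dp via a prefix-sum array, reading each dp value off as a difference of two prefix sums.
-- outside the precondition, e.g. on d_supplement(2, 2, [2, -1]): A returns 1, B returns 2
import Mathlib
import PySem

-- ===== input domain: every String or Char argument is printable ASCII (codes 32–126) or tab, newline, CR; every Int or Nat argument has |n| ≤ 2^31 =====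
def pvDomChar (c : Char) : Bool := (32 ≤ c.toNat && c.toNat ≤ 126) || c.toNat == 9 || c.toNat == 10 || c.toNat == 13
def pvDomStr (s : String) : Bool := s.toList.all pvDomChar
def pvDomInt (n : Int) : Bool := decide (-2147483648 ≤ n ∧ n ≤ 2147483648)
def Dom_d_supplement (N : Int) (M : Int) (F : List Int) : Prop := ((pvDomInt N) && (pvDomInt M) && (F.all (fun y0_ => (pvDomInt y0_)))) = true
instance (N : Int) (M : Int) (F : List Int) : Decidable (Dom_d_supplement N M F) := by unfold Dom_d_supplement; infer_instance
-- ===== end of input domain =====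

-- B drops A's counting array and shrink while-loop: a first pass with a last-occurrence
-- dictionary computes each window start, a second pass fills dp via a prefix-sum array.

-- ===== PORT A =====
-- while num[F[i]] > 1: … — fuel-bounded recursion; the fuel (i - left) + 1 passed by the
-- caller covers every step the Python loop can take on inputs satisfying Pre_.
def dShrinkA (F : List Int) (dp : List Int) (fi : Int) :
    Nat → List Int → Int → Int → List Int × Int × Int
  | 0, num, left, sum => (num, left, sum)
  | fuel + 1, num, left, sum =>
    if PySem.List.pyGetD num fi 0 > 1 then
      let fl := PySem.List.pyGetD F left 0
      let num' := PySem.List.pySetD num fl (PySem.List.pyGetD num fl 0 - 1)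
      let s1 := sum - PySem.List.pyGetD dp left 0
      let s2 := if s1 < 0 then s1 + 1000000007 else s1
      let s3 := PySem.Int.mod s2 1000000007
      dShrinkA F dp fi fuel num' (left + 1) s3
    else (num, left, sum)

-- body of "for i in range(N)": state (dp, num, left, sum)
def dStepA (F : List Int) (st : List Int × List Int × Int × Int) (i : Int) :
    List Int × List Int × Int × Int :=
  let (dp, num, left, sum) := st
  let fi := PySem.List.pyGetD F i 0
  let num1 := PySem.List.pySetD num fi (PySem.List.pyGetD num fi 0 + 1)
  let (num2, left2, sum2) := dShrinkA F dp fi ((i - left).toNat + 1) num1 left sum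
  let dp2 := PySem.List.pySetD dp (i + 1) sum2
  let sum3 := PySem.Int.mod (sum2 + PySem.List.pyGetD dp2 (i + 1) 0) 1000000007
  (dp2, num2, left2, sum3)

def d_supplement (N : Int) (M : Int) (F : List Int) : Int :=
  let dp0 := PySem.List.pySetD (List.replicate (N + 1).toNat (0 : Int)) 0 1
  let num0 := List.replicate (M + 1).toNat (0 : Int)
  let sum0 := PySem.List.pyGetD dp0 0 0
  let st := (PySem.List.pyRange 0 N 1).foldl (dStepA F) (dp0, num0, 0, sum0)
  PySem.List.pyGetD st.1 (-1) 0

-- ===== PORT B =====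
-- pass 1 body: state (last, low, lo); "if t in last and last[t] + 1 > lo: lo = last[t] + 1"
def dStage1 (F : List Int) (st : PySem.Dict Int Int × List Int × Int) (i : Int) :
    PySem.Dict Int Int × List Int × Int :=
  let (last, low, lo) := st
  let t := PySem.List.pyGetD F i 0
  let lo' := match PySem.Dict.get? last t with
    | some p => if p + 1 > lo then p + 1 else lo
    | none => lo
  (PySem.Dict.insert last t i, PySem.List.pySetD low i lo', lo')

-- pass 2 body: state (dp, P); dp[i+1] = (P[i+1]-P[low[i]]) % MOD; P[i+2] = (P[i+1]+dp[i+1]) % MOD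
def dStage2 (low : List Int) (st : List Int × List Int) (i : Int) : List Int × List Int :=
  let (dp, P) := st
  let dp2 := PySem.List.pySetD dp (i + 1)
    (PySem.Int.mod (PySem.List.pyGetD P (i + 1) 0 -
      PySem.List.pyGetD P (PySem.List.pyGetD low i 0) 0) 1000000007)
  let P2 := PySem.List.pySetD P (i + 2)
    (PySem.Int.mod (PySem.List.pyGetD P (i + 1) 0 + PySem.List.pyGetD dp2 (i + 1) 0) 1000000007)
  (dp2, P2)

def d_supplement_alt (N : Int) (M : Int) (F : List Int) : Int :=
  let st1 := (PySem.List.pyRange 0 N 1).foldl (dStage1 F)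
    (PySem.Dict.empty, List.replicate N.toNat (0 : Int), 0)
  let low := st1.2.1
  let dp0 := PySem.List.pySetD (List.replicate (N + 1).toNat (0 : Int)) 0 1
  let P0 := PySem.List.pySetD (List.replicate (N + 2).toNat (0 : Int)) 1 1
  let st2 := (PySem.List.pyRange 0 N 1).foldl (dStage2 low) (dp0, P0)
  PySem.List.pyGetD st2.1 N 0

-- ===== PRECONDITION & SPEC =====
-- Pre_ restricts tastes to the problem's stated domain 0 ≤ F[i] ≤ M (1-origin tastes, plus 0);
-- it excludes negative tastes, on which A's count-array indexing wraps around and silently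
-- aliases distinct tastes (and raises IndexError below -(M+1)), and N > len(F) (IndexError).
def Pre_d_supplement (N : Int) (M : Int) (F : List Int) : Prop :=
  0 ≤ N ∧ N ≤ F.length ∧ ∀ i : Nat, i < N.toNat → 0 ≤ F.getD i 0 ∧ F.getD i 0 ≤ M
instance (N : Int) (M : Int) (F : List Int) : Decidable (Pre_d_supplement N M F) := by
  unfold Pre_d_supplement; infer_instance

def pvWitness_d_supplement : Int × Int × List Int := (3, 2, [1, 2, 1])

def Spec_d_supplement (N : Int) (M : Int) (F : List Int) (out : Int) : Prop := out = d_supplement_alt N M F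
instance (N : Int) (M : Int) (F : List Int) (out : Int) : Decidable (Spec_d_supplement N M F out) := by unfold Spec_d_supplement; infer_instance

-- ===== CLAIM (what is proved, stated in full; the proofs are below) =====
def Claim_equal_d_supplement : Prop := ∀ (N : Int) (M : Int) (F : List Int), Dom_d_supplement N M F → Pre_d_supplement N M F → Spec_d_supplement N M F (d_supplement N M F)

-- ===== LEMMAS AND PROOFS =====

-- F.getD with a Nat index (what both ports read under Pre_)
def fget (F : List Int) (j : Nat) : Int := F.getD j 0

-- last occurrence of taste t among indices < i (what B's dictionary holds)
def lastIdx (F : List Int) : Nat → Int → Option Nat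
  | 0, _ => none
  | i + 1, t => if fget F i = t then some i else lastIdx F i t

-- window start before processing index i (B's running variable lo; A's left)
def loS (F : List Int) : Nat → Nat
  | 0 => 0
  | i + 1 =>
    match lastIdx F i (fget F i) with
    | some p => if p + 1 > loS F i then p + 1 else loS F i
    | none => loS F i

-- number of indices j with l ≤ j < r and F[j] = t (contents of A's num array)
def wcnt (F : List Int) (l r : Nat) (t : Int) : Int :=
  (((Finset.Ico l r).filter (fun j => fget F j = t)).card : Int)

-- prefix sums of the dp values, as the list [PS 0, …, PS (i+1)]
def PSl (F : List Int) : Nat → List Int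
  | 0 => [0, 1]
  | i + 1 =>
    let P := PSl F i
    P ++ [(2 * P.getD (i + 1) 0 - P.getD (loS F (i + 1)) 0) % 1000000007]

def PS (F : List Int) (j : Nat) : Int := (PSl F j).getD j 0

def dpS (F : List Int) : Nat → Int
  | 0 => 1
  | i + 1 => (PS F (i + 1) - PS F (loS F (i + 1))) % 1000000007

-- ===== modular arithmetic helpers =====
lemma emod_sub_left_absorb (M a b : Int) :
    (a % M - b) % M = (a - b) % M := by
  conv_lhs => rw [Int.sub_emod, Int.emod_emod_of_dvd _ dvd_rfl, ← Int.sub_emod]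

lemma emod_add_left_absorb (M a b : Int) :
    (a % M + b) % M = (a + b) % M := by
  conv_lhs => rw [Int.add_emod, Int.emod_emod_of_dvd _ dvd_rfl, ← Int.add_emod]

-- A's  sum -= dp[left]; if sum < 0: sum += MOD; sum %= MOD  computes (a-b) % MOD
lemma modstep (M a b : Int) (hM : 0 < M) :
    PySem.Int.mod
      (if a % M - b % M < 0 then a % M - b % M + M else a % M - b % M) M
      = (a - b) % M := by
  rw [PySem.Int.mod_eq_emod_of_pos hM]
  split_ifs with h
  · rw [Int.add_emod_right, ← Int.sub_emod]
  · rw [← Int.sub_emod]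

-- getD of an appended list
lemma getD_append_lt {xs ys : List Int} {j : Nat} (h : j < xs.length) (d : Int) :
    (xs ++ ys).getD j d = xs.getD j d := by
  simp [List.getD, List.getElem?_append_left h]

lemma getD_append_self {xs : List Int} (x d : Int) :
    (xs ++ [x]).getD xs.length d = x := by
  simp [List.getD]

-- ===== lastIdx / loS facts =====
lemma lastIdx_some {F : List Int} {i p : Nat} {t : Int}
    (h : lastIdx F i t = some p) : p < i ∧ fget F p = t := by
  induction i with
  | zero => simp [lastIdx] at h
  | succ i ih =>
    by_cases hc : fget F i = t
    · simp [lastIdx, hc] at h; subst h; exact ⟨Nat.lt_succ_self i, hc⟩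
    · simp [lastIdx, hc] at h
      obtain ⟨h1, h2⟩ := ih h
      exact ⟨Nat.lt_succ_of_lt h1, h2⟩

lemma lastIdx_ge {F : List Int} {i j : Nat} {t : Int}
    (hj : j < i) (ht : fget F j = t) :
    ∃ p, lastIdx F i t = some p ∧ j ≤ p := by
  induction i with
  | zero => omega
  | succ i ih =>
    by_cases hc : fget F i = t
    · exact ⟨i, by simp [lastIdx, hc], by omega⟩
    · have hji : j < i := by
        rcases Nat.lt_succ_iff_lt_or_eq.mp hj with h | h
        · exact h
        · subst h; exact absurd ht hc
      obtain ⟨p, hp1, hp2⟩ := ih hji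
      exact ⟨p, by simp [lastIdx, hc, hp1], hp2⟩

lemma loS_succ_def (F : List Int) (i : Nat) :
    loS F (i + 1) = match lastIdx F i (fget F i) with
      | some p => if p + 1 > loS F i then p + 1 else loS F i
      | none => loS F i := rfl

lemma loS_le (F : List Int) (i : Nat) : loS F i ≤ i := by
  induction i with
  | zero => simp [loS]
  | succ i ih =>
    rw [loS_succ_def]
    cases h : lastIdx F i (fget F i) with
    | none => exact Nat.le_succ_of_le ih
    | some p =>
      have hpi := (lastIdx_some h).1
      show (if p + 1 > loS F i then p + 1 else loS F i) ≤ i + 1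
      split_ifs <;> omega

lemma loS_mono (F : List Int) (i : Nat) : loS F i ≤ loS F (i + 1) := by
  rw [loS_succ_def]
  cases h : lastIdx F i (fget F i) with
  | none => exact Nat.le.refl
  | some p =>
    show loS F i ≤ (if p + 1 > loS F i then p + 1 else loS F i)
    split_ifs <;> omega

-- the window [loS i, i) never contains two equal tastes
lemma loS_distinct (F : List Int) (i : Nat) :
    ∀ j1 j2, loS F i ≤ j1 → j1 < j2 → j2 < i → fget F j1 ≠ fget F j2 := by
  induction i with
  | zero => omega
  | succ i ih =>
    intro j1 j2 h1 h2 h3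
    have hmono := loS_mono F i
    rcases Nat.lt_succ_iff_lt_or_eq.mp h3 with h | h
    · exact ih j1 j2 (by omega) h2 h
    · intro heq
      rw [h] at h2 heq
      obtain ⟨p, hp, hjp⟩ := lastIdx_ge h2 heq
      have hlo : p + 1 ≤ loS F (i + 1) := by
        rw [loS_succ_def, hp]
        show p + 1 ≤ (if p + 1 > loS F i then p + 1 else loS F i)
        split_ifs <;> omega
      omega

-- if taste F[i] does not occur in [loS i, i) the window start is unchanged
lemma loS_succ_of_not_mem (F : List Int) (i : Nat)
    (h : ∀ j, loS F i ≤ j → j < i → fget F j ≠ fget F i) :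
    loS F (i + 1) = loS F i := by
  rw [loS_succ_def]
  cases hL : lastIdx F i (fget F i) with
  | none => rfl
  | some p =>
    obtain ⟨hpi, hpt⟩ := lastIdx_some hL
    have hplo : p < loS F i := by
      by_contra hc
      exact h p (by omega) hpi hpt
    show (if p + 1 > loS F i then p + 1 else loS F i) = loS F i
    split_ifs <;> omega

-- if the last previous occurrence q of F[k] lies in the window, the start moves to q+1
lemma lastIdx_maximal {F : List Int} {i q : Nat} {t : Int}
    (hL : lastIdx F i t = some q) :
    ∀ j, q < j → j < i → fget F j ≠ t := by
  induction i with
  | zero => simp [lastIdx] at hL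
  | succ i ih =>
    intro j hqj hji
    by_cases hc : fget F i = t
    · simp [lastIdx, hc] at hL
      omega
    · simp [lastIdx, hc] at hL
      rcases Nat.lt_succ_iff_lt_or_eq.mp hji with h | h
      · exact ih hL j hqj h
      · subst h; exact hc

lemma loS_succ_eq {F : List Int} {k q : Nat}
    (hL : lastIdx F k (fget F k) = some q) (h : loS F k ≤ q) :
    loS F (k + 1) = q + 1 := by
  rw [loS_succ_def, hL]
  show (if q + 1 > loS F k then q + 1 else loS F k) = q + 1
  split_ifs <;> omega

-- ===== wcnt facts =====
lemma wcnt_zero_of {F : List Int} {l r : Nat} {t : Int}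
    (h : ∀ j, l ≤ j → j < r → fget F j ≠ t) : wcnt F l r t = 0 := by
  unfold wcnt
  have : (Finset.Ico l r).filter (fun j => fget F j = t) = ∅ := by
    apply Finset.eq_empty_of_forall_notMem
    intro j hj
    simp only [Finset.mem_filter, Finset.mem_Ico] at hj
    exact h j hj.1.1 hj.1.2 hj.2
  simp [this]

lemma wcnt_one_of {F : List Int} {l r p : Nat} {t : Int}
    (hlp : l ≤ p) (hpr : p < r) (hpt : fget F p = t)
    (huniq : ∀ j, l ≤ j → j < r → fget F j = t → j = p) : wcnt F l r t = 1 := by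
  unfold wcnt
  have : (Finset.Ico l r).filter (fun j => fget F j = t) = {p} := by
    apply Finset.ext
    intro j
    simp only [Finset.mem_filter, Finset.mem_Ico, Finset.mem_singleton]
    constructor
    · rintro ⟨⟨h1, h2⟩, h3⟩; exact huniq j h1 h2 h3
    · rintro rfl; exact ⟨⟨hlp, hpr⟩, hpt⟩
  simp [this]

lemma wcnt_succ_right {F : List Int} {l r : Nat} (h : l ≤ r) (t : Int) :
    wcnt F l (r + 1) t = wcnt F l r t + (if fget F r = t then 1 else 0) := by
  unfold wcnt
  rw [Nat.Ico_succ_right_eq_insert_Ico h, Finset.filter_insert]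
  split_ifs with hc
  · rw [Finset.card_insert_of_notMem (by simp)]
    push_cast; ring
  · simp

lemma wcnt_succ_left {F : List Int} {l r : Nat} (h : l < r) (t : Int) :
    wcnt F l r t = wcnt F (l + 1) r t + (if fget F l = t then 1 else 0) := by
  unfold wcnt
  rw [← Finset.insert_Ico_add_one_left_eq_Ico h, Finset.filter_insert]
  split_ifs with hc
  · rw [Finset.card_insert_of_notMem (by simp)]
    push_cast; ring
  · simp

-- ===== PS / dpS facts =====
lemma PSl_length (F : List Int) (i : Nat) : (PSl F i).length = i + 2 := by
  induction i with
  | zero => rfl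
  | succ i ih => simp [PSl, ih]

lemma PSl_getD (F : List Int) {i j : Nat} (h : j ≤ i + 1) :
    (PSl F i).getD j 0 = PS F j := by
  induction i with
  | zero =>
    interval_cases j <;> rfl
  | succ i ih =>
    rcases Nat.lt_or_ge j (i + 2) with hj | hj
    · show (PSl F (i + 1)).getD j 0 = PS F j
      have hlen : j < (PSl F i).length := by rw [PSl_length]; omega
      rw [show PSl F (i + 1) = PSl F i ++
        [(2 * (PSl F i).getD (i + 1) 0 - (PSl F i).getD (loS F (i + 1)) 0) % 1000000007] from rfl,
        getD_append_lt hlen]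
      exact ih (by omega)
    · have hj2 : j = i + 2 := by omega
      subst hj2
      show (PSl F (i + 1)).getD (i + 2) 0 = (PSl F (i + 2)).getD (i + 2) 0
      have hlen : i + 2 < (PSl F (i + 1)).length := by rw [PSl_length]; omega
      rw [show PSl F (i + 2) = PSl F (i + 1) ++
        [(2 * (PSl F (i + 1)).getD (i + 2) 0 - (PSl F (i + 1)).getD (loS F (i + 2)) 0) % 1000000007] from rfl,
        getD_append_lt hlen]

lemma PS_top (F : List Int) (i : Nat) :
    PS F (i + 2) = (2 * PS F (i + 1) - PS F (loS F (i + 1))) % 1000000007 := by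
  show (PSl F (i + 2)).getD (i + 2) 0 = _
  have hlen : i + 2 < (PSl F (i + 1)).length := by rw [PSl_length]; omega
  have hlen2 : (PSl F i).length = i + 2 := PSl_length F i
  rw [show PSl F (i + 2) = PSl F (i + 1) ++
    [(2 * (PSl F (i + 1)).getD (i + 2) 0 - (PSl F (i + 1)).getD (loS F (i + 2)) 0) % 1000000007] from rfl,
    getD_append_lt hlen,
    show PSl F (i + 1) = PSl F i ++
    [(2 * (PSl F i).getD (i + 1) 0 - (PSl F i).getD (loS F (i + 1)) 0) % 1000000007] from rfl,
    ← hlen2, getD_append_self]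
  rw [PSl_getD F (by omega : i + 1 ≤ i + 1),
      PSl_getD F ((loS_le F (i + 1)).trans (by omega) : loS F (i + 1) ≤ i + 1)]

lemma dpS_def_eq (F : List Int) (i : Nat) :
    dpS F (i + 1) = (PS F (i + 1) - PS F (loS F (i + 1))) % 1000000007 := rfl

lemma PS_succ (F : List Int) (j : Nat) :
    PS F (j + 1) = (PS F j + dpS F j) % 1000000007 := by
  cases j with
  | zero => rfl
  | succ i =>
    rw [PS_top F i, dpS_def_eq]
    conv_rhs => rw [Int.add_comm]
    rw [emod_add_left_absorb]
    congr 1; ring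

lemma dpS_emod (F : List Int) (j : Nat) :
    dpS F j % 1000000007 = dpS F j := by
  cases j with
  | zero => rfl
  | succ i => rw [dpS_def_eq]; exact Int.emod_emod_of_dvd _ dvd_rfl

lemma dpS_eq_sub (F : List Int) (j : Nat) :
    dpS F j = (PS F (j + 1) - PS F j) % 1000000007 := by
  rw [PS_succ F j, emod_sub_left_absorb]
  have : PS F j + dpS F j - PS F j = dpS F j := by ring
  rw [this, dpS_emod]

-- ===== pyGet/pySet at nonnegative Int indices =====
lemma pyGetD_pySetD_nonneg (xs : List Int) (s t v : Int)
    (hs : 0 ≤ s) (ht : 0 ≤ t) (hlen : s.toNat < xs.length) :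
    PySem.List.pyGetD (PySem.List.pySetD xs s v) t 0
      = if t = s then v else PySem.List.pyGetD xs t 0 := by
  rw [PySem.List.pySetD_of_nonneg _ _ hs,
      PySem.List.pyGetD_of_nonneg _ _ ht,
      PySem.List.pyGetD_of_nonneg _ _ ht]
  by_cases h : t = s
  · subst h
    simp [List.getD, hlen]
  · have hne : s.toNat ≠ t.toNat := by omega
    simp [List.getD, List.getElem?_set_ne hne, h]

-- the while-loop does nothing when its condition is false
lemma shrink_noop (F dp : List Int) (fi : Int) (f : Nat) (num : List Int) (left sum : Int)
    (h : ¬ (PySem.List.pyGetD num fi 0 > 1)) :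
    dShrinkA F dp fi f num left sum = (num, left, sum) := by
  cases f <;> simp [dShrinkA, h]

-- ===== the shrink loop characterised =====
lemma shrink_run (F dp : List Int) (M : Int) (i p : Nat)
    (hpi : p < i)
    (hno : ∀ j, p < j → j < i → fget F j ≠ fget F i)
    (hF : ∀ j, j ≤ i → 0 ≤ fget F j ∧ fget F j ≤ M)
    (hdp : ∀ j, j ≤ i → dp.getD j 0 = dpS F j)
    (hpt : fget F p = fget F i) :
    ∀ (fuel l : Nat) (num : List Int),
      l ≤ p → p + 1 - l ≤ fuel →
      num.length = (M + 1).toNat →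
      (∀ t, 0 ≤ t → t ≤ M → PySem.List.pyGetD num t 0 = wcnt F l (i + 1) t) →
      (∀ j, l ≤ j → j < p → fget F j ≠ fget F i) →
      ∃ num' : List Int,
        dShrinkA F dp (fget F i) fuel num (l : Int)
            ((PS F (i + 1) - PS F l) % 1000000007)
          = (num', ((p + 1 : Nat) : Int), (PS F (i + 1) - PS F (p + 1)) % 1000000007) ∧
        num'.length = (M + 1).toNat ∧
        (∀ t, 0 ≤ t → t ≤ M → PySem.List.pyGetD num' t 0 = wcnt F (p + 1) (i + 1) t) := by
  intro fuel
  induction fuel with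
  | zero => intro l num hlp hfuel _ _ _; omega
  | succ f ih =>
    intro l num hlp hfuel hlen hnum hpre
    have hti := hF i le_rfl
    have hlF := hF l (by omega)
    have huniq : ∀ j, l ≤ j → j < i → fget F j = fget F i → j = p := by
      intro j hj1 hj2 hj3
      rcases lt_trichotomy j p with h | h | h
      · exact absurd hj3 (hpre j hj1 h)
      · exact h
      · exact absurd hj3 (hno j h hj2)
    have hw1 : wcnt F l i (fget F i) = 1 := wcnt_one_of hlp hpi hpt huniq
    have hcond : PySem.List.pyGetD num (fget F i) 0 = 2 := by
      rw [hnum _ hti.1 hti.2, wcnt_succ_right (by omega : l ≤ i), hw1]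
      simp
    -- the new count array after the decrement at slot F[l]
    have hlenN : (fget F l).toNat < num.length := by rw [hlen]; omega
    have hnum' : ∀ t, 0 ≤ t → t ≤ M →
        PySem.List.pyGetD
          (PySem.List.pySetD num (fget F l)
            (PySem.List.pyGetD num (fget F l) 0 - 1)) t 0
          = wcnt F (l + 1) (i + 1) t := by
      intro t ht1 ht2
      rw [pyGetD_pySetD_nonneg num _ t _ hlF.1 ht1 hlenN]
      split_ifs with hts
      · rw [hts, hnum _ hlF.1 hlF.2,
          wcnt_succ_left (show l < i + 1 by omega) (fget F l), if_pos rfl]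
        ring
      · rw [hnum _ ht1 ht2, wcnt_succ_left (show l < i + 1 by omega) t,
          if_neg (fun hc => hts hc.symm), add_zero]
    have hlen' : (PySem.List.pySetD num (fget F l)
        (PySem.List.pyGetD num (fget F l) 0 - 1)).length = (M + 1).toNat := by
      rw [PySem.List.pySetD_of_nonneg _ _ hlF.1, List.length_set, hlen]
    -- one step of the loop
    have hdpl : PySem.List.pyGetD dp ((l : Nat) : Int) 0 = dpS F l := by
      rw [PySem.List.pyGetD_natCast]
      exact hdp l (by omega)
    have hsum : PySem.Int.mod
        (if (PS F (i + 1) - PS F l) % 1000000007 - dpS F l < 0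
          then (PS F (i + 1) - PS F l) % 1000000007 - dpS F l + 1000000007
          else (PS F (i + 1) - PS F l) % 1000000007 - dpS F l) 1000000007
        = (PS F (i + 1) - PS F (l + 1)) % 1000000007 := by
      rw [dpS_eq_sub F l]
      have := modstep 1000000007 (PS F (i + 1) - PS F l) (PS F (l + 1) - PS F l)
        (by norm_num)
      rw [this]
      congr 1; ring
    have hstep : dShrinkA F dp (fget F i) (f + 1) num (l : Int)
        ((PS F (i + 1) - PS F l) % 1000000007)
        = dShrinkA F dp (fget F i) f
            (PySem.List.pySetD num (fget F l)
              (PySem.List.pyGetD num (fget F l) 0 - 1))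
            (((l + 1 : Nat) : Nat) : Int)
            ((PS F (i + 1) - PS F (l + 1)) % 1000000007) := by
      rw [show ((((l + 1 : Nat) : Nat)) : Int) = ((l : Nat) : Int) + 1 by push_cast; ring]
      simp only [dShrinkA, if_pos (by rw [hcond]; norm_num :
        PySem.List.pyGetD num (fget F i) 0 > 1)]
      rw [show PySem.List.pyGetD F ((l : Nat) : Int) 0 = fget F l by
        rw [PySem.List.pyGetD_natCast]; rfl]
      rw [hdpl, hsum]
    rcases Nat.lt_or_ge l p with hlt | hge
    · obtain ⟨num', h1, h2, h3⟩ := ih (l + 1) _ (by omega) (by omega) hlen' hnum'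
        (fun j hj1 hj2 => hpre j (by omega) hj2)
      exact ⟨num', by rw [hstep]; exact h1, h2, h3⟩
    · have hlp' : l = p := by omega
      subst hlp'
      have hw1' : wcnt F (l + 1) (i + 1) (fget F i) = 1 := by
        apply wcnt_one_of (show l + 1 ≤ i by omega) (show i < i + 1 by omega) rfl
        intro j hj1 hj2 hj3
        rcases Nat.lt_or_ge j i with h | h
        · exact absurd hj3 (hno j (by omega) h)
        · omega
      have hcond' : ¬ (PySem.List.pyGetD
          (PySem.List.pySetD num (fget F l)
            (PySem.List.pyGetD num (fget F l) 0 - 1)) (fget F i) 0 > 1) := by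
        rw [hnum' _ hti.1 hti.2, hw1']
        norm_num
      refine ⟨_, ?_, hlen', hnum'⟩
      rw [hstep, shrink_noop _ _ _ _ _ _ _ hcond']

-- ===== invariants and iterates =====
def dIterA (F : List Int) (init : List Int × List Int × Int × Int) (k : Nat) :
    List Int × List Int × Int × Int :=
  (List.range k).foldl (fun st (j : Nat) => dStepA F st (j : Int)) init

def dIter1 (F : List Int) (init : PySem.Dict Int Int × List Int × Int) (k : Nat) :
    PySem.Dict Int Int × List Int × Int :=
  (List.range k).foldl (fun st (j : Nat) => dStage1 F st (j : Int)) init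

def dIter2 (low : List Int) (init : List Int × List Int) (k : Nat) :
    List Int × List Int :=
  (List.range k).foldl (fun st (j : Nat) => dStage2 low st (j : Int)) init

lemma dIterA_succ (F : List Int) (init : List Int × List Int × Int × Int) (k : Nat) :
    dIterA F init (k + 1) = dStepA F (dIterA F init k) (k : Int) := by
  simp [dIterA, List.range_succ]

lemma dIter1_succ (F : List Int) (init : PySem.Dict Int Int × List Int × Int) (k : Nat) :
    dIter1 F init (k + 1) = dStage1 F (dIter1 F init k) (k : Int) := by
  simp [dIter1, List.range_succ]

lemma dIter2_succ (low : List Int) (init : List Int × List Int) (k : Nat) :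
    dIter2 low init (k + 1) = dStage2 low (dIter2 low init k) (k : Int) := by
  simp [dIter2, List.range_succ]

def InvA (F : List Int) (M : Int) (n k : Nat) (st : List Int × List Int × Int × Int) : Prop :=
  st.1.length = n + 1 ∧
  (∀ j, j ≤ k → st.1.getD j 0 = dpS F j) ∧
  st.2.1.length = (M + 1).toNat ∧
  (∀ t : Int, 0 ≤ t → t ≤ M → PySem.List.pyGetD st.2.1 t 0 = wcnt F (loS F k) k t) ∧
  st.2.2.1 = ((loS F k : Nat) : Int) ∧
  st.2.2.2 = (PS F (k + 1) - PS F (loS F k)) % 1000000007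

def Inv1 (F : List Int) (n k : Nat) (st : PySem.Dict Int Int × List Int × Int) : Prop :=
  (∀ t : Int, st.1.get? t = (lastIdx F k t).map (fun p => (p : Int))) ∧
  st.2.1.length = n ∧
  (∀ j, j < k → st.2.1.getD j 0 = ((loS F (j + 1) : Nat) : Int)) ∧
  st.2.2 = ((loS F k : Nat) : Int)

def Inv2 (F : List Int) (n k : Nat) (st : List Int × List Int) : Prop :=
  st.1.length = n + 1 ∧
  st.2.length = n + 2 ∧
  (∀ j, j ≤ k → st.1.getD j 0 = dpS F j) ∧
  (∀ j, j ≤ k + 1 → st.2.getD j 0 = PS F j)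

lemma getD_set_lt (xs : List Int) (m j : Nat) (v : Int) (h : j < m) :
    (xs.set m v).getD j 0 = xs.getD j 0 := by
  simp [List.getD, List.getElem?_set_ne (by omega : m ≠ j)]

lemma getD_set_self (xs : List Int) (m : Nat) (v : Int) (h : m < xs.length) :
    (xs.set m v).getD m 0 = v := by
  simp [List.getD, h]

lemma stepA_inv (F : List Int) (M : Int) (n k : Nat) (hk : k < n)
    (hF : ∀ j, j < n → 0 ≤ fget F j ∧ fget F j ≤ M)
    (st : List Int × List Int × Int × Int) (h : InvA F M n k st) :
    InvA F M n (k + 1) (dStepA F st (k : Int)) := by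
  obtain ⟨dp, num, left, sum⟩ := st
  obtain ⟨hdplen, hdp, hnumlen, hnum, hleft, hsum⟩ := h
  simp only at hdplen hdp hnumlen hnum hleft hsum
  subst hleft hsum
  have hfk := hF k hk
  have hM0 : 0 ≤ M := hfk.1.trans hfk.2
  have hlok := loS_le F k
  -- the incremented count array
  have hlenN : (fget F k).toNat < num.length := by rw [hnumlen]; omega
  have hnum1 : ∀ t, 0 ≤ t → t ≤ M →
      PySem.List.pyGetD
        (PySem.List.pySetD num (fget F k) (PySem.List.pyGetD num (fget F k) 0 + 1)) t 0
        = wcnt F (loS F k) (k + 1) t := by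
    intro t ht1 ht2
    rw [pyGetD_pySetD_nonneg num _ t _ hfk.1 ht1 hlenN,
        wcnt_succ_right hlok t]
    by_cases hts : t = fget F k
    · rw [if_pos hts, hts, hnum _ hfk.1 hfk.2, if_pos rfl]
    · rw [if_neg hts, hnum _ ht1 ht2, if_neg (fun hc => hts hc.symm), add_zero]
  have hlen1 : (PySem.List.pySetD num (fget F k)
      (PySem.List.pyGetD num (fget F k) 0 + 1)).length = (M + 1).toNat := by
    rw [PySem.List.pySetD_of_nonneg _ _ hfk.1, List.length_set, hnumlen]
  have hfuel : (((k : Nat) : Int) - ((loS F k : Nat) : Int)).toNat + 1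
      = (k - loS F k) + 1 := by omega
  -- the shrink loop's effect, by cases on whether F[k] occurs in the window
  have hmain : ∃ num2 : List Int,
      dShrinkA F dp (fget F k) ((k - loS F k) + 1)
          (PySem.List.pySetD num (fget F k) (PySem.List.pyGetD num (fget F k) 0 + 1))
          ((loS F k : Nat) : Int)
          ((PS F (k + 1) - PS F (loS F k)) % 1000000007)
        = (num2, ((loS F (k + 1) : Nat) : Int),
            (PS F (k + 1) - PS F (loS F (k + 1))) % 1000000007) ∧
      num2.length = (M + 1).toNat ∧
      (∀ t, 0 ≤ t → t ≤ M →
        PySem.List.pyGetD num2 t 0 = wcnt F (loS F (k + 1)) (k + 1) t) := by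
    by_cases hocc : ∃ p0, loS F k ≤ p0 ∧ p0 < k ∧ fget F p0 = fget F k
    · obtain ⟨p0, hp1, hp2, hp3⟩ := hocc
      obtain ⟨q, hL, hpq⟩ := lastIdx_ge hp2 hp3
      obtain ⟨hqk, hqt⟩ := lastIdx_some hL
      have hlonext : loS F (k + 1) = q + 1 := loS_succ_eq hL (by omega)
      obtain ⟨num2, h1, h2, h3⟩ := shrink_run F dp M k q hqk
        (lastIdx_maximal hL)
        (fun j hj => hF j (by omega))
        (fun j hj => hdp j (by omega))
        hqt
        ((k - loS F k) + 1) (loS F k)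
        (PySem.List.pySetD num (fget F k) (PySem.List.pyGetD num (fget F k) 0 + 1))
        (by omega) (by omega) hlen1 hnum1
        (fun j hj1 hj2 => by
          have := loS_distinct F k j q hj1 hj2 hqk
          rw [hqt] at this
          exact this)
      rw [hlonext]
      exact ⟨num2, h1, h2, h3⟩
    · have hnomem : ∀ j, loS F k ≤ j → j < k → fget F j ≠ fget F k := by
        intro j hj1 hj2 hc
        exact hocc ⟨j, hj1, hj2, hc⟩
      have hlonext : loS F (k + 1) = loS F k := loS_succ_of_not_mem F k hnomem
      have hcond : ¬ (PySem.List.pyGetD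
          (PySem.List.pySetD num (fget F k) (PySem.List.pyGetD num (fget F k) 0 + 1))
          (fget F k) 0 > 1) := by
        rw [hnum1 _ hfk.1 hfk.2, wcnt_succ_right hlok, wcnt_zero_of hnomem, if_pos rfl]
        norm_num
      refine ⟨_, ?_, hlen1, by rw [hlonext]; exact hnum1⟩
      rw [shrink_noop _ _ _ _ _ _ _ hcond, hlonext]
  obtain ⟨num2, hshrink, hlen2, hnum2⟩ := hmain
  simp only [fget] at hshrink
  -- unfold one iteration of A
  simp only [dStepA, PySem.List.pyGetD_natCast]
  rw [hfuel, hshrink]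
  dsimp only
  have hc1 : ((k : Int) + 1) = ((k + 1 : Nat) : Int) := by push_cast; ring
  rw [hc1]
  simp only [PySem.List.pySetD_natCast, PySem.List.pyGetD_natCast,
    PySem.Int.mod_eq_emod_of_pos (by norm_num : (0:Int) < 1000000007)]
  have hdpval : (dp.set (k + 1)
      ((PS F (k + 1) - PS F (loS F (k + 1))) % 1000000007)).getD (k + 1) 0
      = dpS F (k + 1) := by
    rw [getD_set_self dp (k + 1) _ (by omega), dpS_def_eq]
  refine ⟨by simp [hdplen], ?_, hlen2, hnum2, rfl, ?_⟩
  · intro j hj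
    rcases Nat.lt_or_ge j (k + 1) with hlt | hge
    · rw [getD_set_lt dp (k + 1) j _ hlt]
      exact hdp j (by omega)
    · have hj1 : j = k + 1 := by omega
      subst hj1
      rw [hdpval, dpS_def_eq]
  · rw [hdpval, emod_add_left_absorb, PS_succ F (k + 1), emod_sub_left_absorb]
    ring

lemma step1_inv (F : List Int) (n k : Nat) (hk : k < n)
    (st : PySem.Dict Int Int × List Int × Int) (h : Inv1 F n k st) :
    Inv1 F n (k + 1) (dStage1 F st (k : Int)) := by
  obtain ⟨last, low, lo⟩ := st
  obtain ⟨hlast, hlowlen, hlow, hlo⟩ := h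
  simp only at hlast hlowlen hlow hlo
  subst hlo
  have hget : PySem.Dict.get? last (F.getD k 0)
      = (lastIdx F k (fget F k)).map (fun p => (p : Int)) := hlast _
  have hlo' : (match PySem.Dict.get? last (F.getD k 0) with
      | some p => if p + 1 > ((loS F k : Nat) : Int) then p + 1 else ((loS F k : Nat) : Int)
      | none => ((loS F k : Nat) : Int))
      = ((loS F (k + 1) : Nat) : Int) := by
    rw [hget, loS_succ_def]
    cases hL : lastIdx F k (fget F k) with
    | none => rfl
    | some p =>
      show (if ((p : Nat) : Int) + 1 > ((loS F k : Nat) : Int)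
            then ((p : Nat) : Int) + 1 else ((loS F k : Nat) : Int))
          = (((if p + 1 > loS F k then p + 1 else loS F k) : Nat) : Int)
      split_ifs with h1 h2 h2
      · push_cast; ring
      · omega
      · omega
      · rfl
  simp only [dStage1, PySem.List.pyGetD_natCast, PySem.List.pySetD_natCast]
  rw [hlo']
  refine ⟨?_, by simp [hlowlen], ?_, rfl⟩
  · intro t
    rw [show lastIdx F (k + 1) t
        = if fget F k = t then some k else lastIdx F k t from rfl]
    rw [PySem.Dict.get?_insert]
    split_ifs with h1 h2 h2
    · rfl
    · exact absurd h1.symm (by simpa [fget] using h2)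
    · exact absurd h2.symm (by simpa [fget] using h1)
    · exact hlast t
  · intro j hj
    rcases Nat.lt_or_ge j k with hlt | hge
    · rw [getD_set_lt low k j _ hlt]
      exact hlow j hlt
    · have hj1 : j = k := by omega
      rw [hj1, getD_set_self low k _ (by omega)]

lemma step2_inv (F low : List Int) (n k : Nat) (hk : k < n)
    (hlowlen : low.length = n)
    (hlow : ∀ j, j < n → low.getD j 0 = ((loS F (j + 1) : Nat) : Int))
    (st : List Int × List Int) (h : Inv2 F n k st) :
    Inv2 F n (k + 1) (dStage2 low st (k : Int)) := by
  obtain ⟨dp, P⟩ := st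
  obtain ⟨hdplen, hPlen, hdp, hP⟩ := h
  simp only at hdplen hPlen hdp hP
  have hc1 : ((k : Int) + 1) = ((k + 1 : Nat) : Int) := by push_cast; ring
  have hc2 : ((k : Int) + 2) = ((k + 2 : Nat) : Int) := by push_cast; ring
  have hlowk : PySem.List.pyGetD low ((k : Nat) : Int) 0 = ((loS F (k + 1) : Nat) : Int) := by
    rw [PySem.List.pyGetD_natCast]
    exact hlow k hk
  simp only [dStage2, hlowk, hc1, hc2,
    PySem.List.pyGetD_natCast, PySem.List.pySetD_natCast,
    PySem.Int.mod_eq_emod_of_pos (by norm_num : (0:Int) < 1000000007)]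
  have hPk1 : P.getD (k + 1) 0 = PS F (k + 1) := hP (k + 1) (by omega)
  have hPlo : P.getD (loS F (k + 1)) 0 = PS F (loS F (k + 1)) :=
    hP _ ((loS_le F (k + 1)).trans (by omega))
  have hdpval : (dp.set (k + 1)
      ((P.getD (k + 1) 0 - P.getD (loS F (k + 1)) 0) % 1000000007)).getD (k + 1) 0
      = dpS F (k + 1) := by
    rw [getD_set_self dp (k + 1) _ (by omega), hPk1, hPlo, dpS_def_eq]
  refine ⟨by simp [hdplen], by simp [hPlen], ?_, ?_⟩
  · intro j hj
    rcases Nat.lt_or_ge j (k + 1) with hlt | hge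
    · rw [getD_set_lt dp (k + 1) j _ hlt]
      exact hdp j (by omega)
    · have hj1 : j = k + 1 := by omega
      subst hj1
      exact hdpval
  · intro j hj
    rcases Nat.lt_or_ge j (k + 2) with hlt | hge
    · rw [getD_set_lt P (k + 2) j _ hlt]
      exact hP j (by omega)
    · have hj1 : j = k + 2 := by omega
      subst hj1
      rw [getD_set_self P (k + 2) _ (by omega), hdpval, hPk1, PS_succ F (k + 1)]

-- the invariants hold after k iterations
lemma iterA_inv (F : List Int) (M : Int) (n : Nat)
    (hF : ∀ j, j < n → 0 ≤ fget F j ∧ fget F j ≤ M)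
    (k : Nat) (hk : k ≤ n) :
    InvA F M n k (dIterA F
      (PySem.List.pySetD (List.replicate (n + 1) (0 : Int)) 0 1,
        List.replicate (M + 1).toNat (0 : Int), 0,
        PySem.List.pyGetD (PySem.List.pySetD (List.replicate (n + 1) (0 : Int)) 0 1) 0 0) k) := by
  induction k with
  | zero =>
    have hdp0 : PySem.List.pySetD (List.replicate (n + 1) (0 : Int)) 0 1
        = 1 :: List.replicate n 0 := by
      rw [List.replicate_succ, PySem.List.pySetD_of_nonneg _ _ (by norm_num : (0:Int) ≤ 0)]
      rfl
    simp only [dIterA, List.range_zero, List.foldl_nil, hdp0]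
    refine ⟨by simp, ?_, by simp, ?_, rfl, ?_⟩
    · intro j hj
      have hj0 : j = 0 := by omega
      subst hj0
      rfl
    · intro t ht1 ht2
      rw [wcnt_zero_of (fun j h1 h2 => by omega)]
      rcases Nat.lt_or_ge t.toNat (M + 1).toNat with hlt | hge
      · rw [PySem.List.pyGetD_of_nonneg _ _ ht1]
        simp [List.getD]
      · rw [PySem.List.pyGetD_of_nonneg _ _ ht1]
        simp [List.getD, List.getElem?_eq_none (by simp; omega : (List.replicate (M+1).toNat (0:Int)).length ≤ t.toNat)]
    · show PySem.List.pyGetD (1 :: List.replicate n (0 : Int)) 0 0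
          = (PS F (0 + 1) - PS F (loS F 0)) % 1000000007
      rw [PySem.List.pyGetD_zero_cons,
          show loS F 0 = 0 from rfl,
          show PS F 1 = 1 from rfl,
          show PS F 0 = 0 from rfl]
      norm_num
  | succ k ih =>
    rw [dIterA_succ]
    exact stepA_inv F M n k (by omega) hF _ (ih (by omega))

lemma iter1_inv (F : List Int) (n : Nat) (k : Nat) (hk : k ≤ n) :
    Inv1 F n k (dIter1 F (PySem.Dict.empty, List.replicate n (0 : Int), 0) k) := by
  induction k with
  | zero =>
    simp only [dIter1, List.range_zero, List.foldl_nil]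
    exact ⟨fun t => rfl, by simp, fun j hj => by omega, rfl⟩
  | succ k ih =>
    rw [dIter1_succ]
    exact step1_inv F n k (by omega) _ (ih (by omega))

lemma iter2_inv (F low : List Int) (n : Nat)
    (hlowlen : low.length = n)
    (hlow : ∀ j, j < n → low.getD j 0 = ((loS F (j + 1) : Nat) : Int))
    (k : Nat) (hk : k ≤ n) :
    Inv2 F n k (dIter2 low
      (PySem.List.pySetD (List.replicate (n + 1) (0 : Int)) 0 1,
        PySem.List.pySetD (List.replicate (n + 2) (0 : Int)) 1 1) k) := by
  induction k with
  | zero =>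
    have hdp0 : PySem.List.pySetD (List.replicate (n + 1) (0 : Int)) 0 1
        = 1 :: List.replicate n 0 := by
      rw [List.replicate_succ, PySem.List.pySetD_of_nonneg _ _ (by norm_num : (0:Int) ≤ 0)]
      rfl
    have hP0 : PySem.List.pySetD (List.replicate (n + 2) (0 : Int)) 1 1
        = 0 :: 1 :: List.replicate n 0 := by
      rw [show (n + 2) = (n + 1) + 1 from rfl, List.replicate_succ, List.replicate_succ,
        PySem.List.pySetD_of_nonneg _ _ (by norm_num : (0:Int) ≤ 1)]
      rfl
    simp only [dIter2, List.range_zero, List.foldl_nil, hdp0, hP0]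
    refine ⟨by simp, by simp, ?_, ?_⟩
    · intro j hj
      have hj0 : j = 0 := by omega
      subst hj0
      rfl
    · intro j hj
      interval_cases j <;> rfl
  | succ k ih =>
    rw [dIter2_succ]
    exact step2_inv F low n k (by omega) hlowlen hlow _ (ih (by omega))

-- ===== VERDICT (by name: the statement is the Claim_ definition above) =====
theorem d_supplement_spec : Claim_equal_d_supplement := by
  intro N M F _ hpre
  obtain ⟨hN0, hNlen, hFb⟩ := hpre
  unfold Spec_d_supplement
  have hN : N = ((N.toNat : Nat) : Int) := (Int.toNat_of_nonneg hN0).symm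
  rw [hN]
  set n := N.toNat with hn
  have hF : ∀ j, j < n → 0 ≤ fget F j ∧ fget F j ≤ M := fun j hj => hFb j hj
  have hN1 : ((n : Int) + 1).toNat = n + 1 := by omega
  have hN2 : ((n : Int) + 2).toNat = n + 2 := by omega
  have hNt : ((n : Int)).toNat = n := by omega
  simp only [d_supplement, d_supplement_alt]
  rw [PySem.List.pyRange_zero_nat, hN1, hN2, hNt]
  simp only [List.foldl_map]
  -- stage 1 of B: the low table
  have inv1 := iter1_inv F n n le_rfl
  set st1 := dIter1 F (PySem.Dict.empty, List.replicate n (0 : Int), 0) n with hst1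
  obtain ⟨-, hlowlen, hlow, -⟩ := inv1
  have h1 : List.foldl (fun st (j : Nat) => dStage1 F st (j : Int))
      (PySem.Dict.empty, List.replicate n (0 : Int), 0) (List.range n) = st1 := rfl
  rw [h1]
  -- stage 2 of B
  have inv2 := iter2_inv F st1.2.1 n hlowlen (fun j hj => hlow j hj) n le_rfl
  set st2 := dIter2 st1.2.1
    (PySem.List.pySetD (List.replicate (n + 1) (0 : Int)) 0 1,
      PySem.List.pySetD (List.replicate (n + 2) (0 : Int)) 1 1) n with hst2
  obtain ⟨hdplen2, -, hdp2, -⟩ := inv2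
  have h2 : List.foldl (fun st (j : Nat) => dStage2 st1.2.1 st (j : Int))
      (PySem.List.pySetD (List.replicate (n + 1) (0 : Int)) 0 1,
        PySem.List.pySetD (List.replicate (n + 2) (0 : Int)) 1 1) (List.range n) = st2 := rfl
  rw [h2]
  -- A's loop
  have invA := iterA_inv F M n hF n le_rfl
  set stA := dIterA F
    (PySem.List.pySetD (List.replicate (n + 1) (0 : Int)) 0 1,
      List.replicate (M + 1).toNat (0 : Int), 0,
      PySem.List.pyGetD (PySem.List.pySetD (List.replicate (n + 1) (0 : Int)) 0 1) 0 0) n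
    with hstA
  obtain ⟨hdplenA, hdpA, -⟩ := invA
  have hA : List.foldl (fun st (j : Nat) => dStepA F st (j : Int))
      (PySem.List.pySetD (List.replicate (n + 1) (0 : Int)) 0 1,
        List.replicate (M + 1).toNat (0 : Int), 0,
        PySem.List.pyGetD (PySem.List.pySetD (List.replicate (n + 1) (0 : Int)) 0 1) 0 0)
      (List.range n) = stA := rfl
  rw [hA]
  -- both sides return dp[n] = dpS n
  have hne : stA.1 ≠ [] := by
    intro hnil; rw [hnil] at hdplenA; simp at hdplenA
  rw [PySem.List.pyGetD_neg_one _ _ hne]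
  have hlast : stA.1.getLast hne = stA.1.getD n 0 := by
    rw [List.getLast_eq_getElem, List.getD_eq_getElem _ _ (by omega)]
    simp [hdplenA]
  rw [hlast, hdpA n le_rfl, PySem.List.pyGetD_natCast, hdp2 n le_rfl]
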